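-- pv_equiv track=rewrite | github.com/CheeseMan1213/CSE_1310 | HW09/Hawley-hw09-2.py | UniqueItemsPerMonth
-- ===== SOURCE A (Python) =====
-- def UniqueItemsPerMonth(LargeList):# this one is being used in another function
--     #[January, car,str(0), phone,str(0),skillet,str(0)]
--     ML = [["January"],
--           ["February"],
--           ["March"],
--           ["April"],
--           ["May"],
--           ["June"],
--           ["July"],
--           ["August"],
--           ["September"],
--           ["October"],
--           ["November"],
--           ["December"]]
--
--
--     for value in ML:# value is a 1D List
--         for line in LargeList:# line is a 1D List
--             tokens = line[0].split(",")
--             if value[0] == tokens[0] and tokens[1] not in value: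
--                 value.append(tokens[1])
--                 value.append("0")
--         value.append("0")
--
--
--
--
--
--     return ML
-- ===== SOURCE B (Python) =====
-- MONTHS = ["January", "February", "March", "April", "May", "June", "July",
--           "August", "September", "October", "November", "December"]
--
--
-- def UniqueItemsPerMonth(LargeList):
--     # One pass over the data: group by month in a dict holding, per month, the
--     # output row plus a set mirroring the row's elements for O(1) dedup.
--     rows = {m: ([m], {m}) for m in MONTHS}
--     for line in LargeList:
--         tokens = line[0].split(",")
--         entry = rows.get(tokens[0])
--         if entry is not None:
--             row, seen = entry
--             item = tokens[1]
--             if item not in seen: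
--                 row.append(item)
--                 row.append("0")
--                 seen.add(item)
--                 seen.add("0")
--     return [rows[m][0] + ["0"] for m in MONTHS]
-- ===== Notes on version B (the rewrite author's own statement) =====
-- stated objective: alternative
-- what changed: Instead of A's outer loop over the 12 months that rescans and re-splits the whole input once per month and dedups by scanning the growing output row, B makes a single pass over the input, grouping lines by month in a dict that keeps each output row together with a set of its elements for the dedup test, then emits the rows in month order.
import Mathlib
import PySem

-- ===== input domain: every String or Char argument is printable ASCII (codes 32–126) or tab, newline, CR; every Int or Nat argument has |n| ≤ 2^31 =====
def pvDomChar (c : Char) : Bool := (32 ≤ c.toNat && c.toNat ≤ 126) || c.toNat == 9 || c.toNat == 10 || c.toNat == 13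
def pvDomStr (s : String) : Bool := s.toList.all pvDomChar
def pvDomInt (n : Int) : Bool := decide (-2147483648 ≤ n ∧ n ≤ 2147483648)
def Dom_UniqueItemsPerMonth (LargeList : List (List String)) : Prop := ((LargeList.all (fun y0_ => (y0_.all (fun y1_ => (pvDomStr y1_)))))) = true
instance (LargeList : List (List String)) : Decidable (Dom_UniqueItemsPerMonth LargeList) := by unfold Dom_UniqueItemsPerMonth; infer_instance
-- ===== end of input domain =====

-- B replaces A's 12 passes over the data (one per month, with a linear dedup scan
-- of the growing row) by a single pass grouping lines by month in a dict, with a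
-- per-month set for the dedup test; objective: alternative (different traversal).

-- ===== PORT A =====
-- the 12 month names (the heads of A's literal ML rows; shared helper)
def pvMonths : List String :=
  ["January", "February", "March", "April", "May", "June", "July",
   "August", "September", "October", "November", "December"]

-- body of A's inner 'for line in LargeList' loop acting on one month row v
def pvStepA (v : List String) (line : List String) : List String :=
  let tokens := (PySem.Str.split? ((PySem.List.pyGet? line 0).getD "") ",").getD []
  let t0 := (PySem.List.pyGet? tokens 0).getD ""
  let t1 := (PySem.List.pyGet? tokens 1).getD ""
  if (PySem.List.pyGet? v 0).getD "" = t0 ∧ t1 ∉ v then v ++ [t1, "0"] else v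

def UniqueItemsPerMonth (LargeList : List (List String)) : List (List String) :=
  -- ML = [["January"], …]; each row is mutated by the inner loop, then gets a "0"
  (pvMonths.map (fun m => [m])).map
    (fun value => (LargeList.foldl pvStepA value) ++ ["0"])

-- ===== PORT B =====
-- rows = {m: ([m], {m}) for m in MONTHS}
def pvInitB : PySem.Dict String (List String × PySem.Set String) :=
  pvMonths.foldl (fun d m => d.insert m ([m], PySem.Set.ofList [m])) PySem.Dict.empty

-- body of B's single 'for line in LargeList' loop
def pvStepB (d : PySem.Dict String (List String × PySem.Set String))
    (line : List String) : PySem.Dict String (List String × PySem.Set String) :=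
  let tokens := (PySem.Str.split? ((PySem.List.pyGet? line 0).getD "") ",").getD []
  let t0 := (PySem.List.pyGet? tokens 0).getD ""
  match d.get? t0 with
  | none => d
  | some entry =>
      let t1 := (PySem.List.pyGet? tokens 1).getD ""
      if entry.2.contains t1 then d
      else d.insert t0 (entry.1 ++ [t1, "0"], (entry.2.add t1).add "0")

def UniqueItemsPerMonth_alt (LargeList : List (List String)) : List (List String) :=
  let d := LargeList.foldl pvStepB pvInitB
  pvMonths.map (fun m => (d.getD m ([], PySem.Set.empty)).1 ++ ["0"])

-- ===== PRECONDITION & SPEC =====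
-- Pre_ excludes exactly the inputs where A raises IndexError: a line that is the
-- empty list (line[0]), or a line whose first token is a month name but whose
-- cell has no comma (tokens[1]).
def Pre_UniqueItemsPerMonth (LargeList : List (List String)) : Prop :=
  ∀ line ∈ LargeList, line ≠ [] ∧
    (let tokens := (PySem.Str.split? ((PySem.List.pyGet? line 0).getD "") ",").getD []
     (PySem.List.pyGet? tokens 0).getD "" ∈ pvMonths → 2 ≤ tokens.length)
instance (LargeList : List (List String)) : Decidable (Pre_UniqueItemsPerMonth LargeList) := by
  unfold Pre_UniqueItemsPerMonth; infer_instance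

def pvWitness_UniqueItemsPerMonth : List (List String) :=
  [["January,car"], ["January,car"], ["May,0"], ["stuff"]]

def Spec_UniqueItemsPerMonth (LargeList : List (List String)) (out : List (List String)) : Prop := out = UniqueItemsPerMonth_alt LargeList
instance (LargeList : List (List String)) (out : List (List String)) : Decidable (Spec_UniqueItemsPerMonth LargeList out) := by unfold Spec_UniqueItemsPerMonth; infer_instance

-- ===== CLAIM (what is proved, stated in full; the proofs are below) =====
def Claim_equal_UniqueItemsPerMonth : Prop := ∀ (LargeList : List (List String)), Dom_UniqueItemsPerMonth LargeList → Pre_UniqueItemsPerMonth LargeList → Spec_UniqueItemsPerMonth LargeList (UniqueItemsPerMonth LargeList)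

-- ===== LEMMAS AND PROOFS =====

-- invariant: every stored entry's row starts with its key, and its set holds
-- exactly the row's elements
def pvInv (d : PySem.Dict String (List String × PySem.Set String)) : Prop :=
  ∀ m rv, d.get? m = some rv →
    (∃ w, rv.1 = m :: w) ∧ (∀ x, x ∈ rv.2 ↔ x ∈ rv.1)

lemma pvKeys_init : pvInitB.keys = pvMonths := by decide

lemma pvInit_get : ∀ m ∈ pvMonths, pvInitB.get? m = some ([m], PySem.Set.ofList [m]) := by
  decide

lemma pvInv_init : pvInv pvInitB := by
  intro m rv h
  by_cases hm : m ∈ pvMonths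
  · rw [pvInit_get m hm] at h
    injection h with h; subst h
    exact ⟨⟨[], rfl⟩, fun x => by simp [PySem.Set.mem_ofList]⟩
  · rw [(PySem.Dict.get?_eq_none_iff_not_mem_keys _ _).mpr (pvKeys_init ▸ hm)] at h
    cases h

lemma pvStep_pair (line : List String)
    (d : PySem.Dict String (List String × PySem.Set String)) (hInv : pvInv d) :
    pvInv (pvStepB d line) ∧
    ∀ m rv, d.get? m = some rv →
      ∃ s', (pvStepB d line).get? m = some (pvStepA rv.1 line, s') := by
  simp only [pvStepB]
  set tokens := (PySem.Str.split? ((PySem.List.pyGet? line 0).getD "") ",").getD [] with htok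
  set t0 := (PySem.List.pyGet? tokens 0).getD "" with ht0
  set t1 := (PySem.List.pyGet? tokens 1).getD "" with ht1
  have hstepA_id : ∀ v : List String, ((PySem.List.pyGet? v 0).getD "" = t0 ∧ t1 ∉ v) →
      pvStepA v line = v ++ [t1, "0"] := by
    intro v hv; simp [pvStepA, ← htok, ← ht0, ← ht1, hv]
  have hstepA_no : ∀ v : List String, ¬((PySem.List.pyGet? v 0).getD "" = t0 ∧ t1 ∉ v) →
      pvStepA v line = v := by
    intro v hv; simp only [pvStepA, ← htok, ← ht0, ← ht1]; rw [if_neg hv]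
  cases hrow : d.get? t0 with
  | none =>
      refine ⟨hInv, ?_⟩
      intro m rv hm
      have hne : m ≠ t0 := by rintro rfl; rw [hm] at hrow; cases hrow
      obtain ⟨⟨w, hw⟩, _⟩ := hInv m rv hm
      have h0 : pvStepA rv.1 line = rv.1 := by
        refine hstepA_no _ ?_
        rw [hw]; simp [hne]
      refine ⟨rv.2, ?_⟩
      rw [h0, Prod.mk.eta]
      exact hm
  | some entry =>
      obtain ⟨⟨w, hw⟩, hset⟩ := hInv t0 entry hrow
      by_cases hmem : entry.2.contains t1 = true
      · have hmemrow : t1 ∈ entry.1 := (hset t1).mp ((PySem.Set.contains_iff _ _).mp hmem)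
        simp only [hmem, if_pos]
        refine ⟨hInv, ?_⟩
        intro m rv hm
        have h0 : pvStepA rv.1 line = rv.1 := by
          by_cases hm0 : m = t0
          · subst hm0
            rw [hm] at hrow; injection hrow with hrow; subst hrow
            exact hstepA_no _ (by simp [hmemrow])
          · obtain ⟨u, hu⟩ := (hInv m rv hm).1
            refine hstepA_no _ ?_
            rw [hu]; simp [hm0]
        refine ⟨rv.2, ?_⟩
        rw [h0, Prod.mk.eta]
        exact hm
      · have hnotrow : t1 ∉ entry.1 := fun hx =>
          hmem ((PySem.Set.contains_iff _ _).mpr ((hset t1).mpr hx))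
        simp only [hmem, if_neg, Bool.not_eq_true]
        constructor
        · intro m rv hm
          rw [PySem.Dict.get?_insert] at hm
          split_ifs at hm with hm0
          · subst hm0; injection hm with hm; subst hm
            refine ⟨⟨w ++ [t1, "0"], by simp [hw]⟩, fun x => ?_⟩
            simp only [PySem.Set.mem_add, hset x, List.mem_append, List.mem_cons,
              List.mem_singleton, List.not_mem_nil, or_false]
            tauto
          · exact hInv m rv hm
        · intro m rv hm
          rw [PySem.Dict.get?_insert]
          by_cases hm0 : m = t0
          · subst hm0
            rw [hm] at hrow; injection hrow with hrow; subst hrow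
            have h0 : pvStepA rv.1 line = rv.1 ++ [t1, "0"] := by
              refine hstepA_id _ ⟨?_, hnotrow⟩
              rw [hw]; simp
            rw [if_pos rfl, h0]
            exact ⟨(rv.2.add t1).add "0", rfl⟩
          · obtain ⟨u, hu⟩ := (hInv m rv hm).1
            have h0 : pvStepA rv.1 line = rv.1 := by
              refine hstepA_no _ ?_
              rw [hu]; simp [hm0]
            refine ⟨rv.2, ?_⟩
            rw [if_neg hm0, h0, Prod.mk.eta]
            exact hm

lemma pvFold_get (lines : List (List String)) :
    ∀ (d : PySem.Dict String (List String × PySem.Set String)), pvInv d →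
    ∀ m rv, d.get? m = some rv →
      ∃ s', (lines.foldl pvStepB d).get? m = some (lines.foldl pvStepA rv.1, s') := by
  induction lines with
  | nil => intro d _ m rv hm; exact ⟨rv.2, by simpa [Prod.mk.eta] using hm⟩
  | cons line rest ih =>
      intro d hInv m rv hm
      obtain ⟨hInv', hstep⟩ := pvStep_pair line d hInv
      obtain ⟨s', hs'⟩ := hstep m rv hm
      obtain ⟨s'', hs''⟩ := ih (pvStepB d line) hInv' m (pvStepA rv.1 line, s') hs'
      exact ⟨s'', by simpa using hs''⟩

-- ===== VERDICT (by name: the statement is the Claim_ definition above) =====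
theorem UniqueItemsPerMonth_spec : Claim_equal_UniqueItemsPerMonth := by
  intro LargeList _ _
  unfold Spec_UniqueItemsPerMonth UniqueItemsPerMonth UniqueItemsPerMonth_alt
  rw [List.map_map]
  refine List.map_congr_left ?_
  intro m hm
  obtain ⟨s', hs'⟩ :=
    pvFold_get LargeList pvInitB pvInv_init m ([m], PySem.Set.ofList [m]) (pvInit_get m hm)
  simp [Function.comp, PySem.Dict.getD_eq_get?_getD, hs']
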